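-- pv_equiv track=rewrite | github.com/innewiadro/Codewars | kata_level7/Max_sum_between_two_negatives/Max_sum_between_two_negatives.py | max_sum_between_two_negatives
-- ===== SOURCE A (Python) =====
-- def max_sum_between_two_negatives(arr):
--     list_of_max= []
--     maximum = 0
--     first_neg = False
--     for i, num in enumerate(arr):
--         if num < 0:
--             if first_neg:
--                 list_of_max.append(maximum)
--             else:
--                 first_neg = True
--             maximum = 0
--         else:
--             maximum += num
--     return max(list_of_max) if len(list_of_max) else -1
-- ===== SOURCE B (Python) =====
-- def max_sum_between_two_negatives(arr):
--     neg = [i for i, x in enumerate(arr) if x < 0]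
--     if len(neg) < 2:
--         return -1
--     return max(sum(arr[neg[k] + 1:neg[k + 1]]) for k in range(len(neg) - 1))
-- ===== Notes on version B (the rewrite author's own statement) =====
-- stated objective: alternative
-- what changed: B first collects the indices of the negative elements, then takes the max over sums of the slices between consecutive negative indices, instead of A's single accumulating scan with reset-on-negative state.
import Mathlib
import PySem

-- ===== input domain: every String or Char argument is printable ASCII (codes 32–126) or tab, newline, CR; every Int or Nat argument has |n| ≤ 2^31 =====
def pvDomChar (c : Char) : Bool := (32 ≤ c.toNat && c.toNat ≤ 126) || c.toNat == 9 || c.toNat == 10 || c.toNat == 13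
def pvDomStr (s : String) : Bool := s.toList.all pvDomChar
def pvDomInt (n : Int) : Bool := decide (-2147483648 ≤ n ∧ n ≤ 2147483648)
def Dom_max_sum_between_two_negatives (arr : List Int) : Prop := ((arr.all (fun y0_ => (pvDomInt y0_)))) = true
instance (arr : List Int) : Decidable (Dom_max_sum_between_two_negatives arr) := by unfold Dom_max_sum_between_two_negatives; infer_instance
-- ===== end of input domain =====

-- B collects negative indices first and maximises slice sums between consecutive ones; same O(n) cost, different decomposition.

-- ===== PORT A =====
-- the loop body of A (index i is unused by the body, so it takes only the element)
def pvStepA (st : List Int × Int × Bool) (num : Int) : List Int × Int × Bool :=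
  if num < 0 then
    (if st.2.2 then (st.1 ++ [st.2.1], 0, true) else (st.1, 0, true))
  else (st.1, st.2.1 + num, st.2.2)

def max_sum_between_two_negatives (arr : List Int) : Int :=
  let s := (PySem.List.enumerate arr 0).foldl (fun st p => pvStepA st p.2) ([], 0, false)
  if s.1.length ≠ 0 then (PySem.List.max? s.1 (fun y => y)).getD (-1) else -1

-- ===== PORT B =====
def max_sum_between_two_negatives_alt (arr : List Int) : Int :=
  let neg : List Int := ((PySem.List.enumerate arr 0).filter (fun p => p.2 < 0)).map (·.1)
  if neg.length < 2 then -1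
  else
    let sums := (PySem.List.pyRange 0 ((neg.length : Int) - 1) 1).map
      (fun k => (PySem.List.slice arr (some (PySem.List.pyGetD neg k 0 + 1))
                                      (some (PySem.List.pyGetD neg (k + 1) 0))).sum)
    (PySem.List.max? sums (fun y => y)).getD (-1)

-- ===== PRECONDITION & SPEC =====
def Spec_max_sum_between_two_negatives (arr : List Int) (out : Int) : Prop := out = max_sum_between_two_negatives_alt arr
instance (arr : List Int) (out : Int) : Decidable (Spec_max_sum_between_two_negatives arr out) := by unfold Spec_max_sum_between_two_negatives; infer_instance

-- ===== CLAIM (what is proved, stated in full; the proofs are below) =====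
def Claim_equal_max_sum_between_two_negatives : Prop := ∀ (arr : List Int), Dom_max_sum_between_two_negatives arr → Spec_max_sum_between_two_negatives arr (max_sum_between_two_negatives arr)

-- ===== LEMMAS AND PROOFS =====

-- segments of A's scan: sums accumulated between consecutive negatives
def segsAfter : List Int → Int → List Int
  | [], _ => []
  | x :: t, acc => if x < 0 then acc :: segsAfter t 0 else segsAfter t (acc + x)

def tailAcc : List Int → Int → Int
  | [], acc => acc
  | x :: t, acc => if x < 0 then tailAcc t 0 else tailAcc t (acc + x)

def segs : List Int → List Int
  | [] => []
  | x :: t => if x < 0 then segsAfter t 0 else segs t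

-- indices of negative elements, as naturals
def negIdxN : List Int → List Nat
  | [] => []
  | x :: t => if x < 0 then 0 :: (negIdxN t).map (· + 1) else (negIdxN t).map (· + 1)

-- B's list of slice sums, in Nat-indexed drop/take form
def Gl (arr : List Int) : List Int :=
  (List.range ((negIdxN arr).length - 1)).map
    (fun k => ((arr.drop ((negIdxN arr).getD k 0 + 1)).take
        ((negIdxN arr).getD (k + 1) 0 - ((negIdxN arr).getD k 0 + 1))).sum)

theorem enumFold (arr : List Int) : ∀ (s : Int) (init : List Int × Int × Bool),
    (PySem.List.enumerate arr s).foldl (fun st p => pvStepA st p.2) init = arr.foldl pvStepA init := by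
  induction arr with
  | nil => intro s init; simp [PySem.List.enumerate_nil]
  | cons x t ih =>
      intro s init
      simp [PySem.List.enumerate_cons, List.foldl_cons, ih]


theorem foldA_true (arr : List Int) : ∀ (lom : List Int) (m : Int),
    arr.foldl pvStepA (lom, m, true) = (lom ++ segsAfter arr m, tailAcc arr m, true) := by
  induction arr with
  | nil => intro lom m; simp [segsAfter, tailAcc]
  | cons x t ih =>
      intro lom m
      by_cases hx : x < 0
      · simp [List.foldl_cons, pvStepA, hx, segsAfter, tailAcc, ih]
      · simp [List.foldl_cons, pvStepA, hx, segsAfter, tailAcc, ih]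


theorem foldA_false (arr : List Int) : ∀ (m : Int),
    (arr.foldl pvStepA ([], m, false)).1 = segs arr := by
  induction arr with
  | nil => intro m; simp [segs]
  | cons x t ih =>
      intro m
      by_cases hx : x < 0
      · simp [List.foldl_cons, pvStepA, hx, segs, foldA_true]
      · simp [List.foldl_cons, pvStepA, hx, segs, ih]


theorem castShift (l : List Nat) (s : Int) :
    ((l.map (· + 1)).map (fun (k : Nat) => s + (k : Int))) = l.map (fun (k : Nat) => (s + 1) + (k : Int)) := by
  rw [List.map_map]
  refine List.map_congr_left (fun k _ => ?_)
  simp only [Function.comp]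
  push_cast
  ring

theorem negI_eq (arr : List Int) : ∀ (s : Int),
    ((PySem.List.enumerate arr s).filter (fun p => p.2 < 0)).map (·.1)
      = (negIdxN arr).map (fun (k : Nat) => s + (k : Int)) := by
  induction arr with
  | nil => intro s; simp [PySem.List.enumerate_nil, negIdxN]
  | cons x t ih =>
      intro s
      by_cases hx : x < 0
      · rw [PySem.List.enumerate_cons, List.filter_cons]
        simp only [hx, decide_true, if_pos, List.map_cons, ih (s + 1)]
        rw [negIdxN]
        simp only [if_pos hx, List.map_cons, castShift]
        norm_num
      · rw [PySem.List.enumerate_cons, List.filter_cons]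
        simp only [hx, decide_false, Bool.false_eq_true, if_false, ih (s + 1)]
        rw [negIdxN]
        simp only [if_neg hx, castShift]

theorem len_segsAfter (t : List Int) : ∀ acc, (segsAfter t acc).length = (negIdxN t).length := by
  induction t with
  | nil => intro acc; simp [segsAfter, negIdxN]
  | cons x t ih =>
      intro acc
      by_cases hx : x < 0
      · simp [segsAfter, negIdxN, hx, ih]
      · simp [segsAfter, negIdxN, hx, ih]


theorem len_segs (arr : List Int) : (segs arr).length = (negIdxN arr).length - 1 := by
  induction arr with
  | nil => simp [segs, negIdxN]
  | cons x t ih =>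
      by_cases hx : x < 0
      · simp [segs, negIdxN, hx, len_segsAfter]
      · simp [segs, negIdxN, hx, ih]


theorem Gl_shift (t : List Int) (x : Int) (hx : ¬ x < 0) : Gl (x :: t) = Gl t := by
  unfold Gl
  rw [negIdxN]
  simp only [if_neg hx, List.length_map]
  refine List.map_congr_left (fun k hk => ?_)
  rw [List.mem_range] at hk
  have h1 : k < (negIdxN t).length := by omega
  have h2 : k + 1 < (negIdxN t).length := by omega
  rw [List.getD_eq_getElem _ _ (by simpa using h2), List.getD_eq_getElem _ _ (by simpa using h1),
      List.getD_eq_getElem _ _ h2, List.getD_eq_getElem _ _ h1]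
  simp only [List.getElem_map]
  rw [show (negIdxN t)[k] + 1 + 1 = ((negIdxN t)[k] + 1) + 1 from rfl, List.drop_succ_cons]
  congr 2
  omega


theorem Gl_cons (t : List Int) (x : Int) (hx : x < 0) :
    Gl (x :: t) = (match negIdxN t with
      | [] => []
      | j :: _ => [(t.take j).sum]) ++ Gl t := by
  unfold Gl
  rw [negIdxN]
  simp only [if_pos hx]
  cases hns : negIdxN t with
  | nil => simp
  | cons j rest =>
      have hlen : (0 :: ((j :: rest).map (· + 1))).length - 1 = rest.length + 1 := by
        simp
      rw [hlen, List.range_succ_eq_map, List.map_cons]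
      have hhead : (((x :: t).drop ((0 :: (j :: rest).map (· + 1)).getD 0 0 + 1)).take
          ((0 :: (j :: rest).map (· + 1)).getD (0 + 1) 0 -
            ((0 :: (j :: rest).map (· + 1)).getD 0 0 + 1))).sum = (t.take j).sum := by
        simp
      rw [hhead]
      have hlen2 : (j :: rest).length - 1 = rest.length := by simp
      rw [hlen2]
      congr 1
      rw [List.map_map]
      refine List.map_congr_left (fun k hk => ?_)
      rw [List.mem_range] at hk
      have h1 : k < (j :: rest).length := by simp; omega
      have h2 : k + 1 < (j :: rest).length := by simp; omega
      simp only [Function.comp, Nat.succ_eq_add_one]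
      rw [List.getD_cons_succ, List.getD_cons_succ,
          List.getD_eq_getElem _ _ (by simpa using h2), List.getD_eq_getElem _ _ (by simpa using h1),
          List.getD_eq_getElem _ _ h2, List.getD_eq_getElem _ _ h1]
      simp only [List.getElem_map]
      rw [show (j :: rest)[k] + 1 + 1 = (((j :: rest)[k] + 1)) + 1 from rfl, List.drop_succ_cons]
      congr 2
      omega


theorem segsAfter_eq_Gl (t : List Int) : ∀ acc,
    segsAfter t acc = (match negIdxN t with
      | [] => []
      | j :: _ => [acc + (t.take j).sum]) ++ Gl t := by
  induction t with
  | nil => intro acc; simp [segsAfter, negIdxN, Gl]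
  | cons y u ih =>
      intro acc
      by_cases hy : y < 0
      · rw [segsAfter]
        simp only [if_pos hy]
        rw [ih 0, Gl_cons u y hy, negIdxN]
        simp only [if_pos hy]
        cases hns : negIdxN u with
        | nil => simp
        | cons j rest => simp
      · rw [segsAfter]
        simp only [if_neg hy]
        rw [ih (acc + y), Gl_shift u y hy, negIdxN]
        simp only [if_neg hy]
        cases hns : negIdxN u with
        | nil => simp
        | cons j rest =>
            simp only [List.map_cons, List.take_succ_cons, List.sum_cons]
            congr 2
            ring


theorem segs_eq_Gl (arr : List Int) : segs arr = Gl arr := by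
  induction arr with
  | nil => simp [segs, negIdxN, Gl]
  | cons x t ih =>
      by_cases hx : x < 0
      · rw [segs]
        simp only [if_pos hx]
        rw [segsAfter_eq_Gl t 0, Gl_cons t x hx]
        cases hns : negIdxN t with
        | nil => simp
        | cons j rest => simp
      · rw [segs]
        simp only [if_neg hx]
        rw [ih, Gl_shift t x hx]


theorem sums_eq_Gl (arr : List Int) :
    (PySem.List.pyRange 0 ((((negIdxN arr).map (fun (k : Nat) => (k : Int))).length : Int) - 1) 1).map
      (fun k => (PySem.List.slice arr
          (some (PySem.List.pyGetD ((negIdxN arr).map (fun (k : Nat) => (k : Int))) k 0 + 1))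
          (some (PySem.List.pyGetD ((negIdxN arr).map (fun (k : Nat) => (k : Int))) (k + 1) 0))).sum)
      = Gl arr := by
  unfold Gl
  rw [List.length_map, PySem.List.pyRange_one]
  have hlen : (((negIdxN arr).length : Int) - 1 - 0).toNat = (negIdxN arr).length - 1 := by omega
  rw [hlen, List.map_map]
  refine List.map_congr_left (fun k hk => ?_)
  rw [List.mem_range] at hk
  have h1 : k < (negIdxN arr).length := by omega
  have h2 : k + 1 < (negIdxN arr).length := by omega
  simp only [Function.comp_apply]
  have e1 : (0 : Int) + (k : Int) = ((k : Nat) : Int) := by ring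
  have e2 : (k : Int) + 1 = (((k + 1 : Nat)) : Int) := by push_cast; ring
  rw [e1, e2, PySem.List.pyGetD_natCast, PySem.List.pyGetD_natCast,
      List.getD_eq_getElem _ _ (by simpa using h1), List.getD_eq_getElem _ _ (by simpa using h2)]
  simp only [List.getElem_map]
  have e3 : (((negIdxN arr)[k] : Int) + 1) = (((negIdxN arr)[k] + 1 : Nat) : Int) := by push_cast; ring
  rw [e3, PySem.List.slice_natCast,
      List.getD_eq_getElem _ _ h2, List.getD_eq_getElem _ _ h1]


-- ===== VERDICT (by name: the statement is the Claim_ definition above) =====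
theorem max_sum_between_two_negatives_spec : Claim_equal_max_sum_between_two_negatives := by
  intro arr _
  unfold Spec_max_sum_between_two_negatives
  unfold max_sum_between_two_negatives max_sum_between_two_negatives_alt
  simp only [enumFold arr 0, negI_eq arr 0, zero_add]
  rw [foldA_false arr 0, sums_eq_Gl arr, ← segs_eq_Gl, List.length_map]
  by_cases h : (negIdxN arr).length < 2
  · have h0 : (segs arr).length = 0 := by rw [len_segs]; omega
    simp [h, h0]
  · have h0 : (segs arr).length ≠ 0 := by rw [len_segs]; omega
    simp [h, h0]
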